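-- pv_equiv track=rewrite | github.com/kailashbachu0401/InterviewBundle | Stripe/8-InvoiceMatch.py | find_invoice_by_amount_with_forgiveness
-- ===== SOURCE A (Python) =====
-- def find_invoice_by_amount_with_forgiveness(invoices, payment_amount, forgiveness):
--     matches = [
--         invoice for invoice in invoices
--         if abs(invoice["amount"] - payment_amount) <= forgiveness
--     ]
--     if not matches:
--         return None
--
--     return min(matches, key=lambda invoice: invoice["due_date"])
-- ===== SOURCE B (Python) =====
-- def find_invoice_by_amount_with_forgiveness(invoices, payment_amount, forgiveness):
--     dates = [
--         invoice["due_date"] for invoice in invoices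
--         if abs(invoice["amount"] - payment_amount) <= forgiveness
--     ]
--     if not dates:
--         return None
--     earliest = min(dates)
--     for invoice in invoices:
--         if abs(invoice["amount"] - payment_amount) <= forgiveness \
--                 and invoice["due_date"] == earliest:
--             return invoice
-- ===== Notes on version B (the rewrite author's own statement) =====
-- stated objective: alternative
-- what changed: Instead of filter-then-min(key=due_date) over invoice dicts, B first computes the minimal due date among matching invoices and then scans for the first matching invoice carrying that date (min's first-minimum tie rule falls out of the scan order).
import Mathlib
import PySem

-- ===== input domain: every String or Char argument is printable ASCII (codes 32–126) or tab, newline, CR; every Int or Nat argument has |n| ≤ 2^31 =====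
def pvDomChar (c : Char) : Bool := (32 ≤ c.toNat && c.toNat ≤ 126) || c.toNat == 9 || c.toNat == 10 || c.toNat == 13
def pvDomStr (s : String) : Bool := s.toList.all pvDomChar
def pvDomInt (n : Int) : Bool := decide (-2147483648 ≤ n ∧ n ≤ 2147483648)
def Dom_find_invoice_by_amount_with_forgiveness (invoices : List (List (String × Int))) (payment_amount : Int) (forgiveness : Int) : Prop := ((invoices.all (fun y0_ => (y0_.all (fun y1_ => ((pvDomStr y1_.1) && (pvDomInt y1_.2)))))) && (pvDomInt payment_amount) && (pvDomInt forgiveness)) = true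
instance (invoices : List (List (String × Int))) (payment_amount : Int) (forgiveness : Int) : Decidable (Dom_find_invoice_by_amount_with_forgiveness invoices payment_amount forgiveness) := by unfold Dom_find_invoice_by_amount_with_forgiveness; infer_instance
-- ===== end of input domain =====

-- B replaces filter-then-min(key=due_date) by a two-stage scan: first compute the minimal
-- due date among matching invoices, then return the first matching invoice with that date.

-- shared helper: Python's invoice[k] on an association-list dict (first match); the
-- default 0 is never reached inside Pre_, which guarantees the keys are present.
def pvLookupD (d : List (String × Int)) (k : String) : Int :=
  ((d.find? (fun p => p.1 == k)).map (fun p => p.2)).getD 0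

-- ===== PORT A =====
def find_invoice_by_amount_with_forgiveness (invoices : List (List (String × Int))) (payment_amount : Int) (forgiveness : Int) : Option (List (String × Int)) :=
  let ms := invoices.filter (fun invoice => decide (|pvLookupD invoice "amount" - payment_amount| ≤ forgiveness))
  if ms.isEmpty then none
  else PySem.List.min? ms (fun invoice => pvLookupD invoice "due_date")

-- ===== PORT B =====
def find_invoice_by_amount_with_forgiveness_alt (invoices : List (List (String × Int))) (payment_amount : Int) (forgiveness : Int) : Option (List (String × Int)) :=
  let dates := (invoices.filter (fun invoice => decide (|pvLookupD invoice "amount" - payment_amount| ≤ forgiveness))).map (fun invoice => pvLookupD invoice "due_date")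
  match dates with
  | [] => none
  | d :: rest =>
    let earliest := rest.foldl min d   -- min(dates) on a nonempty list is the running-min loop
    invoices.find? (fun invoice =>
      decide (|pvLookupD invoice "amount" - payment_amount| ≤ forgiveness)
        && (pvLookupD invoice "due_date" == earliest))

-- ===== PRECONDITION & SPEC =====
-- Pre_ excludes exactly the inputs where Python raises KeyError: an invoice missing "amount",
-- or an invoice inside the forgiveness window missing "due_date".
def Pre_find_invoice_by_amount_with_forgiveness (invoices : List (List (String × Int))) (payment_amount : Int) (forgiveness : Int) : Prop :=
  invoices.all (fun invoice =>
    match invoice.find? (fun p => p.1 == "amount") with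
    | none => false
    | some a =>
      !(decide (|a.2 - payment_amount| ≤ forgiveness)) ||
        (invoice.find? (fun p => p.1 == "due_date")).isSome) = true
instance (invoices : List (List (String × Int))) (payment_amount : Int) (forgiveness : Int) : Decidable (Pre_find_invoice_by_amount_with_forgiveness invoices payment_amount forgiveness) := by unfold Pre_find_invoice_by_amount_with_forgiveness; infer_instance

def pvWitness_find_invoice_by_amount_with_forgiveness : (List (List (String × Int))) × Int × Int :=
  ([[("amount", 5), ("due_date", 3)], [("amount", 9), ("due_date", 1)]], 5, 1)

def Spec_find_invoice_by_amount_with_forgiveness (invoices : List (List (String × Int))) (payment_amount : Int) (forgiveness : Int) (out : Option (List (String × Int))) : Prop := out = find_invoice_by_amount_with_forgiveness_alt invoices payment_amount forgiveness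
instance (invoices : List (List (String × Int))) (payment_amount : Int) (forgiveness : Int) (out : Option (List (String × Int))) : Decidable (Spec_find_invoice_by_amount_with_forgiveness invoices payment_amount forgiveness out) := by unfold Spec_find_invoice_by_amount_with_forgiveness; infer_instance

-- ===== CLAIM =====
def Claim_equal_find_invoice_by_amount_with_forgiveness : Prop := ∀ (invoices : List (List (String × Int))) (payment_amount : Int) (forgiveness : Int), Dom_find_invoice_by_amount_with_forgiveness invoices payment_amount forgiveness → Pre_find_invoice_by_amount_with_forgiveness invoices payment_amount forgiveness → Spec_find_invoice_by_amount_with_forgiveness invoices payment_amount forgiveness (find_invoice_by_amount_with_forgiveness invoices payment_amount forgiveness)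

-- ===== LEMMAS AND PROOFS =====

-- running min of key over t starting from b
def pvMList {α : Type} (key : α → Int) (t : List α) (b : Int) : Int :=
  t.foldl (fun a y => min a (key y)) b

-- the loop body of PySem.List.min?
def pvStep {α : Type} (key : α → Int) (acc : Option α) (x : α) : Option α :=
  match acc with
  | none => some x
  | some m => if key x < key m then some x else some m

theorem pvMList_le {α : Type} (key : α → Int) (t : List α) (b : Int) :
    pvMList key t b ≤ b := by
  induction t generalizing b with
  | nil => simp [pvMList]
  | cons x t ih =>
    have := ih (min b (key x))
    calc pvMList key (x :: t) b = pvMList key t (min b (key x)) := rfl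
      _ ≤ min b (key x) := this
      _ ≤ b := min_le_left _ _

-- the fold of min?, starting from acc = some b, equals: b itself if key b is the
-- overall minimum, else the first element of t achieving that minimum
theorem pv_fold_min_eq_find {α : Type} (key : α → Int) (t : List α) (b : α) :
    t.foldl (pvStep key) (some b)
      = (if key b = pvMList key t (key b) then some b
         else t.find? (fun x => key x == pvMList key t (key b))) := by
  induction t generalizing b with
  | nil => simp [pvMList]
  | cons x t ih =>
    have hM : pvMList key (x :: t) (key b) = pvMList key t (min (key b) (key x)) := rfl
    rw [List.foldl_cons]
    by_cases h : key x < key b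
    · -- accumulator becomes x
      have hstep : pvStep key (some b) x = some x := by simp [pvStep, h]
      rw [hstep, ih x]
      have hM' : pvMList key (x :: t) (key b) = pvMList key t (key x) := by
        rw [hM]; congr 1; omega
      rw [hM']
      have hle : pvMList key t (key x) ≤ key x := pvMList_le key t (key x)
      by_cases hx : key x = pvMList key t (key x)
      · rw [if_pos hx, if_neg (by omega), List.find?_cons_of_pos (by simp [← hx])]
      · rw [if_neg hx, if_neg (by omega), List.find?_cons_of_neg (by simp [hx])]
    · -- accumulator stays b
      have hstep : pvStep key (some b) x = some b := by simp [pvStep, h]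
      rw [hstep, ih b]
      have hM' : pvMList key (x :: t) (key b) = pvMList key t (key b) := by
        rw [hM]; congr 1; omega
      rw [hM']
      have hle : pvMList key t (key b) ≤ key b := pvMList_le key t (key b)
      by_cases hb : key b = pvMList key t (key b)
      · rw [if_pos hb, if_pos hb]
      · rw [if_neg hb, if_neg hb, List.find?_cons_of_neg (by simp; omega)]

-- min? on a nonempty list finds the first element whose key is the overall minimum
theorem pv_min?_eq_find {α : Type} (key : α → Int) (d : α) (t : List α) :
    PySem.List.min? (d :: t) key
      = (d :: t).find? (fun x => key x == pvMList key t (key d)) := by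
  have hfun : PySem.List.min? (d :: t) key = (d :: t).foldl (pvStep key) none := rfl
  rw [hfun, List.foldl_cons]
  have hstep : pvStep key none d = some d := rfl
  rw [hstep, pv_fold_min_eq_find key t d]
  by_cases hb : key d = pvMList key t (key d)
  · rw [if_pos hb, List.find?_cons_of_pos (by simp [← hb])]
  · rw [if_neg hb, List.find?_cons_of_neg (by simp [hb])]

-- ===== VERDICT =====
theorem find_invoice_by_amount_with_forgiveness_spec : Claim_equal_find_invoice_by_amount_with_forgiveness := by
  intro invoices payment_amount forgiveness _ _
  unfold Spec_find_invoice_by_amount_with_forgiveness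
  unfold find_invoice_by_amount_with_forgiveness find_invoice_by_amount_with_forgiveness_alt
  set p : List (String × Int) → Bool :=
    fun invoice => decide (|pvLookupD invoice "amount" - payment_amount| ≤ forgiveness) with hp
  set key : List (String × Int) → Int := fun invoice => pvLookupD invoice "due_date" with hkey
  cases hms : invoices.filter p with
  | nil => simp
  | cons d t =>
    simp only [List.isEmpty_cons, List.map_cons, Bool.false_eq_true, if_false]
    rw [pv_min?_eq_find key d t]
    have hfind : invoices.find? (fun invoice => p invoice && (key invoice == (t.map key).foldl min (key d)))
        = (invoices.filter p).find? (fun invoice => key invoice == (t.map key).foldl min (key d)) := by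
      rw [List.find?_filter]
      congr 1
      funext x
      by_cases h : p x = true <;> by_cases h2 : key x = (t.map key).foldl min (key d) <;>
        simp [h, h2]
    have hfold : (t.map key).foldl min (key d) = pvMList key t (key d) := by
      unfold pvMList
      rw [List.foldl_map]
    rw [hfind, hms, hfold]
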